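-- pv_equiv track=rewrite | github.com/florianbuetow/coding-challenges | leetcode/medium/831. Masking Personal Information.py | maskPII
-- ===== SOURCE A (Python) =====
-- def maskPII(s: str) -> str:
--     def maskEmail(s):
--         s = s.lower()
--         pos = s.find('@')
--         s = [s[0], '*' * 5, s[pos-1:]]
--         return "".join(s)
--
--     def maskPhoneNumber(s):
--         s = list(s)
--         tmp = [[]]
--         while s:
--             c = s.pop()
--             if c in '+-() ': continue
--             if len(tmp) == 1 and len(tmp[-1]) < 4:
--                 pass
--             elif len(tmp[-1]) >= 3:
--                 tmp.append([])
--             if len(tmp) > 1: c = '*'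
--             tmp[-1].append(c)
--         if len(tmp) > 3: tmp[-1].append('+')
--         for i in range(len(tmp)):
--             tmp[i].reverse()
--             tmp[i] = ''.join(tmp[i])
--         tmp.reverse()
--         return "-".join(tmp)
--
--     if '@' in s:
--         return maskEmail(s)
--     else:
--         return maskPhoneNumber(s)
-- ===== SOURCE B (Python) =====
-- def maskPII(s: str) -> str:
--     if '@' in s:
--         s = s.lower()
--         name, domain = s.split('@', 1)
--         return name[0] + '*****' + name[-1] + '@' + domain
--     kept = [c for c in s if c not in '+-() ']
--     last4 = ''.join(kept[-4:])
--     rest = kept[:-4]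
--     q, r = divmod(len(rest), 3)
--     groups = (['*' * r] if r else []) + ['***'] * q + [last4]
--     if len(groups) > 3:
--         groups[0] = '+' + groups[0]
--     return '-'.join(groups)
-- ===== Notes on version B (the rewrite author's own statement) =====
-- stated objective: simpler
-- what changed: Replaces A's backwards pop-loop that grows a list of reversed digit groups (with end-of-loop group reversal and list reversal) by direct arithmetic: split on '@' for e-mail, and for phone filter the kept characters once, slice off the last four, and build the masked groups from divmod(len(rest), 3).
-- outside the precondition, e.g. on maskPII('@ab'): A returns '@*****b', B raises IndexError; on maskPII('@'): A returns '@*****@', B raises IndexError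
import Mathlib
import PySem

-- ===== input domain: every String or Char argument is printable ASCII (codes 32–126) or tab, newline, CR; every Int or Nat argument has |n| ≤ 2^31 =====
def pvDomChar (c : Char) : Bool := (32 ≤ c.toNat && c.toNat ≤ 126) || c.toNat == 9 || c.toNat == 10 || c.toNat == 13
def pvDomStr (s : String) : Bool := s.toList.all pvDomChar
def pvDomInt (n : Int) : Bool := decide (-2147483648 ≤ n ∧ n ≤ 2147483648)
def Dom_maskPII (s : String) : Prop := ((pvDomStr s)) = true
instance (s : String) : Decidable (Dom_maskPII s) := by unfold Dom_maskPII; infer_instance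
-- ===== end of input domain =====

-- B replaces A's backwards pop-loop that grows reversed digit groups (followed by per-group and
-- whole-list reversal) by a direct split/slice/divmod construction of the groups (objective: simpler).

-- ===== PORT A =====
-- the characters Python's `c in '+-() '` tests against (a one-char `in` is membership — exact)
def pvSeps : List Char := ['+', '-', '(', ')', ' ']

-- the body of A's `while s:` loop, acting on tmp with one popped character c
def pvPhoneStep (tmp : List (List Char)) (c : Char) : List (List Char) :=
  if c ∈ pvSeps then tmp
  else
    let tmp1 := if tmp.length = 1 ∧ (tmp.getLastD []).length < 4 then tmp
      else if 3 ≤ (tmp.getLastD []).length then tmp ++ [[]] else tmp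
    let c1 := if 1 < tmp1.length then '*' else c
    tmp1.dropLast ++ [tmp1.getLastD [] ++ [c1]]

def pvMaskEmailA (cs : List Char) : List Char :=
  let t := PySem.Chars.lower cs                  -- s = s.lower()
  let pos := PySem.Chars.find t ['@']            -- pos = s.find('@')
  match PySem.List.pyGet? t 0 with               -- s[0]; none = IndexError, unreachable here ('@' ∈ s ⇒ s ≠ '')
  | none => []
  | some c0 => [c0] ++ List.replicate 5 '*' ++ PySem.List.slice t (some (pos - 1)) none  -- "".join([s[0], '*'*5, s[pos-1:]])

def pvMaskPhoneA (cs : List Char) : List Char :=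
  let tmp := cs.reverse.foldl pvPhoneStep [[]]   -- while s: c = s.pop(); …   (pops from the right)
  let tmp := if 3 < tmp.length then tmp.dropLast ++ [tmp.getLastD [] ++ ['+']] else tmp  -- tmp[-1].append('+')
  let tmp := tmp.map List.reverse                -- each tmp[i].reverse()
  PySem.Chars.join ['-'] tmp.reverse             -- tmp.reverse(); '-'.join(tmp)

def maskPII (s : String) : String :=
  if '@' ∈ s.toList then String.ofList (pvMaskEmailA s.toList)   -- `'@' in s`: one-char substring test = membership (exact)
  else String.ofList (pvMaskPhoneA s.toList)

-- ===== PORT B =====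
def maskPII_alt (s : String) : String :=
  let cs := s.toList
  if '@' ∈ cs then
    let t := PySem.Chars.lower cs                -- s = s.lower()
    let name := t.takeWhile (· ≠ '@')            -- name, domain = s.split('@', 1)
    let domain := (t.dropWhile (· ≠ '@')).tail
    match PySem.List.pyGet? name 0, PySem.List.pyGet? name (-1) with  -- name[0], name[-1]; none = IndexError (outside Pre_)
    | some c0, some cl => String.ofList ([c0] ++ List.replicate 5 '*' ++ [cl] ++ ['@'] ++ domain)
    | _, _ => ""
  else
    let kept := cs.filter (fun c => !(c ∈ pvSeps))          -- [c for c in s if c not in '+-() ']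
    let last4 := PySem.List.slice kept (some (-4)) none     -- kept[-4:]
    let rest := PySem.List.slice kept none (some (-4))      -- kept[:-4]
    let q := rest.length / 3                                -- q, r = divmod(len(rest), 3): Nat divmod, exact on a length
    let r := rest.length % 3
    let groups := (if r ≠ 0 then [List.replicate r '*'] else []) ++
                  List.replicate q (List.replicate 3 '*') ++ [last4]
    let groups := if 3 < groups.length then
        (match groups with | g0 :: gs => ('+' :: g0) :: gs | [] => [])  -- groups[0] = '+' + groups[0] (never empty)
      else groups
    String.ofList (PySem.Chars.join ['-'] groups)

-- ===== PRECONDITION & SPEC =====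
-- Pre_ excludes strings beginning with '@' (an empty e-mail name), on which A's negative-index
-- wraparound s[pos-1:] accidentally returns a value while B's name[0] raises IndexError.
def Pre_maskPII (s : String) : Prop := s.toList.head? ≠ some '@'
instance (s : String) : Decidable (Pre_maskPII s) := by unfold Pre_maskPII; infer_instance
def pvWitness_maskPII : String := "1(234)567-890"
def Spec_maskPII (s : String) (out : String) : Prop := out = maskPII_alt s
instance (s : String) (out : String) : Decidable (Spec_maskPII s out) := by unfold Spec_maskPII; infer_instance

-- ===== CLAIM (what is proved, stated in full; the proofs are below) =====
def Claim_equal_maskPII : Prop := ∀ (s : String), Dom_maskPII s → Pre_maskPII s → Spec_maskPII s (maskPII s)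

-- ===== LEMMAS AND PROOFS =====

theorem pv_lowerChar_ne (c : Char) (h : c ≠ '@') : PySem.Chars.lowerChar c ≠ '@' := by
  unfold PySem.Chars.lowerChar PySem.Chars.isupper
  split
  · next hu =>
    simp only [decide_eq_true_eq, Bool.and_eq_true] at hu
    have hle : c.toNat ≤ 90 := hu.2
    intro he
    have h2 : (Char.ofNat (c.toNat + 32)).toNat = c.toNat + 32 := by
      rw [Char.toNat_ofNat]
      have hv : Nat.isValidChar (c.toNat + 32) := Or.inl (by omega)
      simp [hv]
    have h3 := congrArg Char.toNat he
    rw [h2] at h3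
    have h64 : c.toNat + 32 = 64 := h3
    have hge : 65 ≤ c.toNat := hu.1
    omega
  · exact h

theorem pv_find_go (pre post : List Char) (hpre : ∀ c ∈ pre, c ≠ '@') (k : Nat) :
    PySem.Chars.find.go ['@'] (pre ++ '@' :: post) k = ((k + pre.length : Nat) : Int) := by
  induction pre generalizing k with
  | nil => simp [PySem.Chars.find.go, List.isPrefixOf]
  | cons a t ih =>
    have ha : a ≠ '@' := hpre a (by simp)
    rw [List.cons_append, PySem.Chars.find.go]
    have hp : List.isPrefixOf ['@'] (a :: (t ++ '@' :: post)) = false := by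
      simp [List.isPrefixOf]; exact fun h => ha h.symm
    rw [hp]
    simp only [Bool.false_eq_true, if_false]
    rw [ih (fun c hc => hpre c (by simp [hc])) (k+1)]
    simp; omega

theorem pv_find_at (pre post : List Char) (hpre : ∀ c ∈ pre, c ≠ '@') :
    PySem.Chars.find (pre ++ '@' :: post) ['@'] = (pre.length : Int) := by
  unfold PySem.Chars.find
  rw [pv_find_go pre post hpre 0]
  simp

theorem pv_pyGet_zero (a : Char) (t : List Char) : PySem.List.pyGet? (a :: t) 0 = some a := by
  simp [PySem.List.pyGet?, PySem.List.pyIdx?]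

theorem pv_pyGet_neg_one (u : List Char) (h : u ≠ []) : PySem.List.pyGet? u (-1) = u.getLast? := by
  have hl : 1 ≤ u.length := List.length_pos_iff.2 h
  simp [PySem.List.pyGet?, PySem.List.pyIdx?]
  rw [if_pos hl, List.getLast?_eq_getElem?]
  simp

theorem pv_decomp (u : List Char) (hin : '@' ∈ u) (hhd : u.head? ≠ some '@') :
    ∃ pre post, u = pre ++ '@' :: post ∧ (∀ c ∈ pre, c ≠ '@') ∧ pre ≠ [] := by
  refine ⟨u.takeWhile (· ≠ '@'), (u.dropWhile (· ≠ '@')).tail, ?_, ?_, ?_⟩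
  · have hdw : u.dropWhile (· ≠ '@') ≠ [] := by
      intro hnil
      have := List.dropWhile_eq_nil_iff.1 hnil '@' hin
      simp at this
    have hhead : ((u.dropWhile (· ≠ '@')).head hdw) = '@' := by
      have := List.head_dropWhile_not (· ≠ '@') hdw
      simpa using this
    have h2 : u.dropWhile (· ≠ '@') = '@' :: (u.dropWhile (· ≠ '@')).tail := by
      conv_lhs => rw [← List.cons_head_tail hdw]
      rw [hhead]
    conv_lhs => rw [← List.takeWhile_append_dropWhile (p := (· ≠ '@')) (l := u), h2]
  · intro c hc
    have := List.mem_takeWhile_imp hc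
    simpa using this
  · intro hnil
    cases hu : u with
    | nil => rw [hu] at hin; simp at hin
    | cons a t =>
      rw [hu] at hnil hhd
      have ha : a ≠ '@' := by simpa using hhd
      rw [List.takeWhile_cons, if_pos (by simpa using ha)] at hnil
      simp at hnil

theorem pv_headD_of_ne_nil (pre : List Char) (h : pre ≠ []) : PySem.List.pyGet? pre 0 = some (pre.headD ' ') := by
  cases pre with
  | nil => exact absurd rfl h
  | cons a t => rw [pv_pyGet_zero]; rfl

theorem pv_getLastD_eq (pre : List Char) (h : pre ≠ []) : pre.getLastD ' ' = pre.getLast h := by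
  rw [List.getLastD_eq_getLast?, List.getLast?_eq_some_getLast h]; rfl

theorem pv_getLastD_of_ne_nil (pre : List Char) (h : pre ≠ []) : PySem.List.pyGet? pre (-1) = some (pre.getLastD ' ') := by
  rw [pv_pyGet_neg_one pre h, List.getLast?_eq_some_getLast h, pv_getLastD_eq pre h]

theorem pv_emailA_closed (pre post : List Char) (hpre : ∀ c ∈ pre, c ≠ '@') (hne : pre ≠ []) :
    (match PySem.List.pyGet? (pre ++ '@' :: post) 0 with
     | none => ([] : List Char)
     | some c0 => [c0] ++ List.replicate 5 '*' ++
         PySem.List.slice (pre ++ '@' :: post) (some (PySem.Chars.find (pre ++ '@' :: post) ['@'] - 1)) none)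
    = [pre.headD ' '] ++ List.replicate 5 '*' ++ [pre.getLastD ' '] ++ '@' :: post := by
  have h0 : PySem.List.pyGet? (pre ++ '@' :: post) 0 = some (pre.headD ' ') := by
    cases pre with
    | nil => exact absurd rfl hne
    | cons a t => rw [List.cons_append, pv_pyGet_zero]; rfl
  have hlen : 1 ≤ pre.length := List.length_pos_iff.2 hne
  have hfind : PySem.Chars.find (pre ++ '@' :: post) ['@'] = (pre.length : Int) := pv_find_at pre post hpre
  have hcast : (pre.length : Int) - 1 = ((pre.length - 1 : Nat) : Int) := by omega
  have hslice : PySem.List.slice (pre ++ '@' :: post) (some ((pre.length : Int) - 1)) none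
      = [pre.getLastD ' '] ++ '@' :: post := by
    rw [hcast, PySem.List.slice_from_natCast]
    rw [List.drop_append_of_le_length (by omega)]
    rw [List.drop_length_sub_one hne, ← pv_getLastD_eq pre hne]
  rw [h0, hfind, hslice]
  simp


def pvSt (p : List Char) : List (List Char) :=
  if p.length ≤ 4 then [p]
  else (p.take 4) :: (List.replicate ((p.length - 5)/3) (List.replicate 3 '*')
       ++ [List.replicate (p.length - 4 - 3*((p.length - 5)/3)) '*'])

theorem pv_getLastD_concat {α : Type} (A : List (List α)) (L d : List α) : (A ++ [L]).getLastD d = L := by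
  simp [List.getLastD_eq_getLast?]

theorem pv_stepC (T : List (List Char)) (c : Char) (hc : c ∉ pvSeps)
    (h1 : T.length = 1) (h2 : (T.getLastD []).length < 4) :
    pvPhoneStep T c = T.dropLast ++ [T.getLastD [] ++ [c]] := by
  simp only [pvPhoneStep, hc, if_false]
  rw [if_pos ⟨h1, h2⟩, if_neg (by omega)]

theorem pv_stepA (T : List (List Char)) (c : Char) (hc : c ∉ pvSeps)
    (h1 : ¬(T.length = 1 ∧ (T.getLastD []).length < 4)) (h2 : 3 ≤ (T.getLastD []).length)
    (h3 : T ≠ []) :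
    pvPhoneStep T c = T ++ [['*']] := by
  simp only [pvPhoneStep, hc, if_false]
  rw [if_neg h1, if_pos h2, if_pos (by simp [List.length_append]; exact List.length_pos_iff.2 h3)]
  simp

theorem pv_stepB (T : List (List Char)) (c : Char) (hc : c ∉ pvSeps)
    (h1 : ¬(T.length = 1 ∧ (T.getLastD []).length < 4)) (h2 : ¬(3 ≤ (T.getLastD []).length))
    (h3 : 1 < T.length) :
    pvPhoneStep T c = T.dropLast ++ [T.getLastD [] ++ ['*']] := by
  simp only [pvPhoneStep, hc, if_false]
  rw [if_neg h1, if_neg h2, if_pos h3]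

theorem pv_step (p : List Char) (c : Char) (hc : c ∉ pvSeps) :
    pvPhoneStep (pvSt p) c = pvSt (p ++ [c]) := by
  by_cases h3 : p.length ≤ 3
  · rw [pvSt, if_pos (show p.length ≤ 4 by omega)]
    rw [pv_stepC _ _ hc (by simp) (by simp; omega)]
    rw [pvSt, if_pos (show (p ++ [c]).length ≤ 4 by simp; omega)]
    simp
  · by_cases h4 : p.length = 4
    · rw [pvSt, if_pos (show p.length ≤ 4 by omega)]
      rw [pv_stepA _ _ hc (by simp; omega) (by simp; omega) (by simp)]
      rw [pvSt, if_neg (by simp; omega)]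
      have e1 : (p ++ [c]).take 4 = p.take 4 := List.take_append_of_le_length (by omega)
      simp [e1, h4, List.take_of_length_le (show p.length ≤ 4 by omega)]
    · have hm : 5 ≤ p.length := by omega
      have hSt : pvSt p = ((p.take 4) :: List.replicate ((p.length - 5)/3) (List.replicate 3 '*'))
          ++ [List.replicate (p.length - 4 - 3*((p.length - 5)/3)) '*'] := by
        rw [pvSt, if_neg (by omega)]; simp
      have hlast : (pvSt p).getLastD [] = List.replicate (p.length - 4 - 3*((p.length - 5)/3)) '*' := by
        rw [hSt, pv_getLastD_concat]
      have hlen : (pvSt p).length = (p.length - 5)/3 + 2 := by rw [hSt]; simp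
      have hL : (p ++ [c]).length = p.length + 1 := by simp
      have e1 : (p ++ [c]).take 4 = p.take 4 := List.take_append_of_le_length (by omega)
      by_cases hl3 : p.length - 4 - 3*((p.length - 5)/3) = 3
      · have hSt2 : pvSt (p ++ [c]) = ((p.take 4) :: List.replicate ((p.length - 5)/3 + 1) (List.replicate 3 '*'))
            ++ [List.replicate 1 '*'] := by
          rw [pvSt, if_neg (by rw [hL]; omega), hL, e1]
          rw [show (p.length + 1 - 5)/3 = (p.length - 5)/3 + 1 by omega]
          rw [show p.length + 1 - 4 - 3*((p.length - 5)/3 + 1) = 1 by omega]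
          simp
        rw [pv_stepA _ _ hc (by rw [hlast]; simp; omega) (by rw [hlast]; simp; omega)
            (by rw [hSt]; simp)]
        rw [hSt, hSt2]
        rw [List.replicate_succ' (n := (p.length - 5)/3)]
        simp [hl3]
      · have hSt2 : pvSt (p ++ [c]) = ((p.take 4) :: List.replicate ((p.length - 5)/3) (List.replicate 3 '*'))
            ++ [List.replicate ((p.length - 4 - 3*((p.length - 5)/3)) + 1) '*'] := by
          rw [pvSt, if_neg (by rw [hL]; omega), hL, e1]
          rw [show (p.length + 1 - 5)/3 = (p.length - 5)/3 by omega]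
          rw [show p.length + 1 - 4 - 3*((p.length - 5)/3) = (p.length - 4 - 3*((p.length - 5)/3)) + 1 by omega]
          simp
        rw [pv_stepB _ _ hc (by rw [hlast]; simp; omega) (by rw [hlast]; simp; omega)
            (by rw [hlen]; omega)]
        rw [hSt, hSt2, pv_getLastD_concat, List.dropLast_concat,
            List.replicate_succ' (n := p.length - 4 - 3*((p.length - 5)/3))]

theorem pv_fold (l p : List Char) :
    List.foldl pvPhoneStep (pvSt p) l = pvSt (p ++ l.filter (fun c => !(c ∈ pvSeps))) := by
  induction l generalizing p with
  | nil => simp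
  | cons c t ih =>
    by_cases hc : c ∈ pvSeps
    · simp only [List.foldl_cons]
      rw [show pvPhoneStep (pvSt p) c = pvSt p from by simp [pvPhoneStep, hc]]
      rw [ih p]
      simp [hc]
    · simp only [List.foldl_cons, pv_step p c hc, ih (p ++ [c])]
      simp [hc]

def pvGroupsA (k : List Char) : List (List Char) :=
  let tmp := pvSt k.reverse
  let tmp := if 3 < tmp.length then tmp.dropLast ++ [tmp.getLastD [] ++ ['+']] else tmp
  (tmp.map List.reverse).reverse

def pvGroupsB (k : List Char) : List (List Char) :=
  let q := (k.length - 4)/3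
  let r := (k.length - 4) % 3
  let g := (if r ≠ 0 then [List.replicate r '*'] else []) ++ List.replicate q (List.replicate 3 '*')
           ++ [k.drop (k.length - 4)]
  if 3 < g.length then (match g with | g0 :: gs => ('+' :: g0) :: gs | [] => []) else g

theorem pv_take4_reverse (k : List Char) :
    (k.reverse.take 4).reverse = k.drop (k.length - 4) := by
  rw [List.take_reverse]
  simp

theorem pv_groups_eq (k : List Char) : pvGroupsA k = pvGroupsB k := by
  simp only [pvGroupsA, pvGroupsB]
  by_cases h4 : k.length ≤ 4
  · have h1 : pvSt k.reverse = [k.reverse] := by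
      rw [pvSt, if_pos (show k.reverse.length ≤ 4 by simpa using h4)]
    rw [h1, if_neg (by simp)]
    rw [show k.length - 4 = 0 by omega]
    simp
  · have hm : 5 ≤ k.length := by omega
    have hrevlen : k.reverse.length = k.length := by simp
    have hSt : pvSt k.reverse = ((k.reverse.take 4) :: List.replicate ((k.length - 5)/3) (List.replicate 3 '*'))
        ++ [List.replicate (k.length - 4 - 3*((k.length - 5)/3)) '*'] := by
      rw [pvSt, if_neg (by rw [hrevlen]; omega), hrevlen]; simp
    have hbase : ∀ (L : List Char),
        (List.map List.reverse (((k.reverse.take 4) :: List.replicate ((k.length - 5)/3) (List.replicate 3 '*')) ++ [L])).reverse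
        = L.reverse :: (List.replicate ((k.length - 5)/3) (List.replicate 3 '*') ++ [k.drop (k.length - 4)]) := by
      intro L
      simp [pv_take4_reverse k, List.map_replicate]
    rw [hSt]
    have hlenA : ((k.reverse.take 4) :: List.replicate ((k.length - 5)/3) (List.replicate 3 '*')
        ++ [List.replicate (k.length - 4 - 3*((k.length - 5)/3)) '*']).length = (k.length - 5)/3 + 2 := by simp
    by_cases hp : 3 < (k.length - 5)/3 + 2
    -- A side first
    · rw [if_pos (by rw [hlenA]; exact hp)]
      have hdl : (((k.reverse.take 4) :: List.replicate ((k.length - 5)/3) (List.replicate 3 '*'))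
            ++ [List.replicate (k.length - 4 - 3*((k.length - 5)/3)) '*']).dropLast
          = (k.reverse.take 4) :: List.replicate ((k.length - 5)/3) (List.replicate 3 '*') :=
        List.dropLast_concat
      have hgl : (((k.reverse.take 4) :: List.replicate ((k.length - 5)/3) (List.replicate 3 '*'))
            ++ [List.replicate (k.length - 4 - 3*((k.length - 5)/3)) '*']).getLastD []
          = List.replicate (k.length - 4 - 3*((k.length - 5)/3)) '*' := pv_getLastD_concat _ _ _
      rw [hdl, hgl]
      rw [hbase (List.replicate (k.length - 4 - 3*((k.length - 5)/3)) '*' ++ ['+'])]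
      -- B side
      by_cases hl3 : (k.length - 4) % 3 = 0
      · have hq : (k.length - 4)/3 = (k.length - 5)/3 + 1 := by omega
        have hl : k.length - 4 - 3*((k.length - 5)/3) = 3 := by omega
        rw [hq, hl, if_neg (show ¬((k.length - 4) % 3 ≠ 0) from by omega)]
        rw [if_pos (show 3 < (([] : List (List Char)) ++ List.replicate ((k.length - 5)/3 + 1) (List.replicate 3 '*')
              ++ [List.drop (k.length - 4) k]).length from by simp; omega)]
        simp only [List.nil_append, List.replicate_succ, List.cons_append]
        simp
      · have hq : (k.length - 4)/3 = (k.length - 5)/3 := by omega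
        have hl : k.length - 4 - 3*((k.length - 5)/3) = (k.length - 4) % 3 := by omega
        rw [hq, hl, if_pos hl3]
        rw [if_pos (show 3 < ([List.replicate ((k.length - 4) % 3) '*'] ++ List.replicate ((k.length - 5)/3) (List.replicate 3 '*')
              ++ [List.drop (k.length - 4) k]).length from by simp; omega)]
        simp [List.reverse_append]

    · rw [if_neg (by rw [hlenA]; exact hp)]
      rw [hbase (List.replicate (k.length - 4 - 3*((k.length - 5)/3)) '*')]
      by_cases hl3 : (k.length - 4) % 3 = 0
      · have hq : (k.length - 4)/3 = (k.length - 5)/3 + 1 := by omega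
        have hl : k.length - 4 - 3*((k.length - 5)/3) = 3 := by omega
        rw [hq, hl, if_neg (show ¬((k.length - 4) % 3 ≠ 0) from by omega)]
        rw [if_neg (show ¬(3 < (([] : List (List Char)) ++ List.replicate ((k.length - 5)/3 + 1) (List.replicate 3 '*')
              ++ [List.drop (k.length - 4) k]).length) from by simp; omega)]
        simp only [List.nil_append, List.replicate_succ, List.cons_append]
        simp
      · have hq : (k.length - 4)/3 = (k.length - 5)/3 := by omega
        have hl : k.length - 4 - 3*((k.length - 5)/3) = (k.length - 4) % 3 := by omega
        rw [hq, hl, if_pos hl3]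
        rw [if_neg (show ¬(3 < ([List.replicate ((k.length - 4) % 3) '*'] ++ List.replicate ((k.length - 5)/3) (List.replicate 3 '*')
              ++ [List.drop (k.length - 4) k]).length) from by simp; omega)]
        simp

theorem pvA_phone (cs : List Char) :
    pvMaskPhoneA cs = PySem.Chars.join ['-'] (pvGroupsA (cs.filter (fun c => !(c ∈ pvSeps)))) := by
  simp only [pvMaskPhoneA, pvGroupsA]
  rw [show ([[]] : List (List Char)) = pvSt [] from rfl, pv_fold, List.filter_reverse]
  simp

-- ===== VERDICT (by name: the statement is the Claim_ definition above) =====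
theorem maskPII_spec : Claim_equal_maskPII := by
  unfold Claim_equal_maskPII
  intro s _ hpre
  unfold Pre_maskPII at hpre
  unfold Spec_maskPII
  by_cases hin : '@' ∈ s.toList
  · simp only [maskPII, maskPII_alt, if_pos hin, pvMaskEmailA]
    have hin' : '@' ∈ PySem.Chars.lower s.toList := by
      simp only [PySem.Chars.lower]
      exact List.mem_map.2 ⟨'@', hin, rfl⟩
    have hhd : (PySem.Chars.lower s.toList).head? ≠ some '@' := by
      simp only [PySem.Chars.lower, List.head?_map]
      intro hcon
      cases hh : s.toList.head? with
      | none => rw [hh] at hcon; simp at hcon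
      | some a =>
        rw [hh] at hcon
        simp only [Option.map_some, Option.some.injEq] at hcon
        have ha : a ≠ '@' := fun h => hpre (by rw [hh, h])
        exact pv_lowerChar_ne a ha hcon
    obtain ⟨pre, post, hu, hprefree, hnepre⟩ := pv_decomp (PySem.Chars.lower s.toList) hin' hhd
    rw [hu]
    rw [pv_emailA_closed pre post hprefree hnepre]
    have hall : ∀ c ∈ pre, (fun x => decide (x ≠ '@')) c = true := fun c hc => by
      simpa using hprefree c hc
    have hself : List.takeWhile (fun x => decide (x ≠ '@')) pre = pre := List.takeWhile_eq_self_iff.2 hall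
    have hnil : List.dropWhile (fun x => decide (x ≠ '@')) pre = [] := List.dropWhile_eq_nil_iff.2 hall
    have htw : (pre ++ '@' :: post).takeWhile (· ≠ '@') = pre := by
      rw [List.takeWhile_append, hself]
      simp
    have hdw : (pre ++ '@' :: post).dropWhile (· ≠ '@') = '@' :: post := by
      rw [List.dropWhile_append, hnil]
      simp
    rw [htw, hdw]
    rw [pv_headD_of_ne_nil pre hnepre, pv_getLastD_of_ne_nil pre hnepre]
    simp
  · simp only [maskPII, maskPII_alt, if_neg hin]
    rw [pvA_phone s.toList, pv_groups_eq]
    have h4 : PySem.List.slice (s.toList.filter (fun c => !(c ∈ pvSeps))) (some (-4)) none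
        = (s.toList.filter (fun c => !(c ∈ pvSeps))).drop ((s.toList.filter (fun c => !(c ∈ pvSeps))).length - 4) :=
      PySem.List.slice_from_neg_ofNat _ 4 (by omega)
    have h5 : PySem.List.slice (s.toList.filter (fun c => !(c ∈ pvSeps))) none (some (-4))
        = (s.toList.filter (fun c => !(c ∈ pvSeps))).take ((s.toList.filter (fun c => !(c ∈ pvSeps))).length - 4) :=
      PySem.List.slice_to_neg_ofNat _ 4 (by omega)
    rw [h4, h5]
    have h6 : ((s.toList.filter (fun c => !(c ∈ pvSeps))).take ((s.toList.filter (fun c => !(c ∈ pvSeps))).length - 4)).length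
        = (s.toList.filter (fun c => !(c ∈ pvSeps))).length - 4 := by simp
    rw [h6, pvGroupsB]
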